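-- pv_equiv track=rewrite | github.com/MrVish/hrcrw | backend/scripts/migrate_kyc_sqlite.py | extract_purpose_from_comments
-- ===== SOURCE A (Python) =====
-- def extract_purpose_from_comments(comments: str) -> str:
--     """Extract purpose of account from comments field."""
--     if not comments:
--         return "Business operations and transactions"
--
--     # Look for purpose-related keywords
--     lines = comments.split('\n')
--     for line in lines:
--         line_lower = line.lower()
--         if any(keyword in line_lower for keyword in ['purpose', 'account', 'business', 'operations']):
--             # Clean up the line and return it
--             cleaned = line.strip().replace('Purpose:', '').replace('Account Purpose:', '').strip()
--             if cleaned and len(cleaned) > 10: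
--                 return cleaned[:500]  # Limit length
--
--     # If comments exist but no purpose found, use first meaningful line
--     meaningful_lines = [line.strip() for line in lines if line.strip() and len(line.strip()) > 10]
--     if meaningful_lines:
--         return meaningful_lines[0][:500]
--
--     # Default purpose
--     return "Business operations and transactions"
-- ===== SOURCE B (Python) =====
-- def extract_purpose_from_comments(comments: str) -> str:
--     """Extract purpose of account from comments field (single pass)."""
--     if not comments:
--         return "Business operations and transactions"
--     fallback = None
--     for line in comments.split('\n'):
--         if any(keyword in line.lower() for keyword in ('purpose', 'account', 'business', 'operations')):
--             cleaned = line.strip().replace('Purpose:', '').replace('Account Purpose:', '').strip()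
--             if len(cleaned) > 10:
--                 return cleaned[:500]
--         stripped = line.strip()
--         if fallback is None and len(stripped) > 10:
--             fallback = stripped
--     return fallback[:500] if fallback is not None else "Business operations and transactions"
-- ===== Notes on version B (the rewrite author's own statement) =====
-- stated objective: simpler
-- what changed: B makes a single pass over the lines, carrying the first meaningful line as a fallback, instead of A's keyword loop followed by a second list-comprehension pass building all meaningful lines.
import Mathlib
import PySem

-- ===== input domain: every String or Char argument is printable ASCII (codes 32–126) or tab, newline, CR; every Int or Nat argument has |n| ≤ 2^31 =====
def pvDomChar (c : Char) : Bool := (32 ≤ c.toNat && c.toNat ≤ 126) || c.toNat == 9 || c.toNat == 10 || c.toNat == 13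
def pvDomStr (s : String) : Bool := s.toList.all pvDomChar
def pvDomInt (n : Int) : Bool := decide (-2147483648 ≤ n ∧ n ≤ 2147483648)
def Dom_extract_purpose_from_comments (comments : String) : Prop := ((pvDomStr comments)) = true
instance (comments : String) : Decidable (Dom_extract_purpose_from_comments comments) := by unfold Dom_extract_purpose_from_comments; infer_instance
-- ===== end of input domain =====

-- B fuses A's two passes (keyword scan, then a second meaningful-line pass) into one pass with a fallback accumulator; same return value.

-- ===== PORT A =====
def pvDefaultPurpose : String := "Business operations and transactions"

-- comments.split('\n'): sep ≠ "" so Str.split? is always `some`; the getD is exact here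
def pvSplitLines (s : String) : List String := (PySem.Str.split? s "\n").getD []

def pvHasKeyword (line : String) : Bool :=
  (["purpose", "account", "business", "operations"]).any
    (fun k => PySem.Str.isIn k (PySem.Str.lower line))

def pvCleaned (line : String) : String :=
  PySem.Str.strip
    (PySem.Str.replace (PySem.Str.replace (PySem.Str.strip line) "Purpose:" "") "Account Purpose:" "")

-- A's first loop: return the cleaned keyword line, if any
def pvLoopA : List String → Option String
  | [] => none
  | line :: rest =>
    if pvHasKeyword line then
      if pvCleaned line ≠ "" ∧ 10 < PySem.Str.len (pvCleaned line) then
        some (PySem.Str.slice (pvCleaned line) none (some 500))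
      else pvLoopA rest
    else pvLoopA rest

def extract_purpose_from_comments (comments : String) : String :=
  if comments = "" then pvDefaultPurpose
  else
    match pvLoopA (pvSplitLines comments) with
    | some r => r
    | none =>
      match ((pvSplitLines comments).map PySem.Str.strip).filter
          (fun s => s != "" && decide (10 < PySem.Str.len s)) with
      | m :: _ => PySem.Str.slice m none (some 500)
      | [] => pvDefaultPurpose

-- ===== PORT B =====
-- B's single loop: fallback carries the first meaningful line seen so far
def pvLoopB : List String → Option String → String
  | [], fb =>
    match fb with
    | some f => PySem.Str.slice f none (some 500)
    | none => pvDefaultPurpose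
  | line :: rest, fb =>
    if pvHasKeyword line ∧ 10 < PySem.Str.len (pvCleaned line) then
      PySem.Str.slice (pvCleaned line) none (some 500)
    else
      pvLoopB rest
        (if fb = none ∧ 10 < PySem.Str.len (PySem.Str.strip line)
         then some (PySem.Str.strip line) else fb)

def extract_purpose_from_comments_alt (comments : String) : String :=
  if comments = "" then pvDefaultPurpose
  else pvLoopB (pvSplitLines comments) none

-- ===== PRECONDITION & SPEC =====
def Spec_extract_purpose_from_comments (comments : String) (out : String) : Prop := out = extract_purpose_from_comments_alt comments
instance (comments : String) (out : String) : Decidable (Spec_extract_purpose_from_comments comments out) := by unfold Spec_extract_purpose_from_comments; infer_instance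

-- ===== CLAIM (what is proved, stated in full; the proofs are below) =====
def Claim_equal_extract_purpose_from_comments : Prop := ∀ (comments : String), Dom_extract_purpose_from_comments comments → Spec_extract_purpose_from_comments comments (extract_purpose_from_comments comments)

-- ===== LEMMAS AND PROOFS =====

-- a string of length > 10 is nonempty
lemma pv_ne_empty_of_len {s : String} (h : 10 < PySem.Str.len s) : s ≠ "" := by
  intro he
  subst he
  simp [PySem.Str.len] at h

-- one line's effect on the fallback equals consing (or not) to the meaningful list
lemma pv_or_step (fb : Option String) (s : String) (L : List String) :
    ((if fb = none ∧ 10 < PySem.Str.len s then some s else fb).or L.head?)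
    = fb.or ((if (s != "" && decide (10 < PySem.Str.len s)) = true then s :: L else L).head?) := by
  cases fb with
  | some f =>
    rw [if_neg (fun hc => by cases hc.1)]
    rfl
  | none =>
    by_cases h : 10 < PySem.Str.len s
    · have hne : s ≠ "" := pv_ne_empty_of_len h
      rw [if_pos ⟨rfl, h⟩, if_pos (by
        simp only [Bool.and_eq_true, bne_iff_ne, decide_eq_true_eq]
        exact ⟨hne, h⟩)]
      rfl
    · rw [if_neg (fun hc => h hc.2), if_neg (by
        simp only [Bool.and_eq_true, bne_iff_ne, decide_eq_true_eq, not_and]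
        exact fun _ hlen => h hlen)]

-- loop-fusion invariant: B's single pass equals A's two passes, fallback threaded
lemma pv_loopB_eq (lines : List String) (fb : Option String) :
    pvLoopB lines fb =
      match pvLoopA lines with
      | some r => r
      | none =>
        match fb.or (((lines.map PySem.Str.strip).filter
            (fun s => s != "" && decide (10 < PySem.Str.len s))).head?) with
        | some m => PySem.Str.slice m none (some 500)
        | none => pvDefaultPurpose := by
  induction lines generalizing fb with
  | nil => cases fb <;> rfl
  | cons line rest ih =>
    by_cases h1 : pvHasKeyword line = true ∧ 10 < PySem.Str.len (pvCleaned line)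
    · have hne : pvCleaned line ≠ "" := pv_ne_empty_of_len h1.2
      simp only [pvLoopB, pvLoopA]
      rw [if_pos h1, if_pos h1.1, if_pos ⟨hne, h1.2⟩]
    · have hA : pvLoopA (line :: rest) = pvLoopA rest := by
        by_cases hk : pvHasKeyword line = true
        · have hc : ¬(pvCleaned line ≠ "" ∧ 10 < PySem.Str.len (pvCleaned line)) :=
            fun hc => h1 ⟨hk, hc.2⟩
          simp only [pvLoopA]
          rw [if_pos hk, if_neg hc]
        · simp only [pvLoopA]
          rw [if_neg hk]
      have hB : pvLoopB (line :: rest) fb =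
          pvLoopB rest
            (if fb = none ∧ 10 < PySem.Str.len (PySem.Str.strip line)
             then some (PySem.Str.strip line) else fb) := by
        simp only [pvLoopB]
        rw [if_neg h1]
      rw [hB, ih, hA]
      simp only [List.map_cons, List.filter_cons]
      cases pvLoopA rest with
      | some r => rfl
      | none => rw [pv_or_step]

-- ===== VERDICT (by name: the statement is the Claim_ definition above) =====
theorem extract_purpose_from_comments_spec : Claim_equal_extract_purpose_from_comments := by
  intro comments _
  unfold Spec_extract_purpose_from_comments extract_purpose_from_comments extract_purpose_from_comments_alt
  by_cases hc : comments = ""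
  · simp [hc]
  · simp only [if_neg hc]
    rw [pv_loopB_eq]
    cases pvLoopA (pvSplitLines comments) with
    | some r => rfl
    | none =>
      cases hfil : ((pvSplitLines comments).map PySem.Str.strip).filter
          (fun s => s != "" && decide (10 < PySem.Str.len s)) <;> rfl
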